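-- pv_equiv track=rewrite | github.com/H-Yeji/StudyCodingTest | Programmers/Lv1/비밀지도.py | solution
-- ===== SOURCE A (Python) =====
-- def solution(n, arr1, arr2):
--     # 10진수 > 2진수 변환
--     arr1_bin, arr2_bin = [], []
--     for i in range(n):
--         b1 = format(arr1[i], 'b')
--         b2 = format(arr2[i], 'b')
--
--         # arr1
--         if len(b1) < n:
--             b1 = '0' * (n - len(b1)) + b1
--             arr1_bin.append(b1)
--         else:
--             arr1_bin.append(b1)
--         # arr2
--         if len(b2) < n:
--             b2 = '0' * (n - len(b2)) + b2
--             arr2_bin.append(b2)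
--         else:
--             arr2_bin.append(b2)
--
--     # 합치기
--     result_s = []
--     for i in range(n):
--         num = int(arr1_bin[i]) + int(arr2_bin[i])
--         s = str(num)
--         if len(s) < n:
--             s = '0' * (n - len(s)) + s
--         result_s.append(s)
--
--     result = []
--     for i in result_s:
--         s = str(i)
--         ss = ''
--         for j in range(len(s)):
--             if s[j] == '0':
--                 ss = ss + ' '
--             else:
--                 ss = ss + '#'
--         result.append(ss)
--     return result
-- ===== SOURCE B (Python) =====
-- def solution(n, arr1, arr2):
--     table = str.maketrans('01', ' #')
--     return [format(arr1[i] | arr2[i], 'b').zfill(n).translate(table) for i in range(n)]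
-- ===== Notes on version B (the rewrite author's own statement) =====
-- stated objective: simpler
-- what changed: Replaces A's three passes (binary-string conversion with manual padding, decimal addition of the two binary strings, char-by-char rendering loop) by one comprehension per row: integer bitwise OR, zfill, and a translation table.
-- outside the precondition, e.g. on solution(1, [-1], [-1]): A returns ['##'], B returns ['-#']
import Mathlib
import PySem

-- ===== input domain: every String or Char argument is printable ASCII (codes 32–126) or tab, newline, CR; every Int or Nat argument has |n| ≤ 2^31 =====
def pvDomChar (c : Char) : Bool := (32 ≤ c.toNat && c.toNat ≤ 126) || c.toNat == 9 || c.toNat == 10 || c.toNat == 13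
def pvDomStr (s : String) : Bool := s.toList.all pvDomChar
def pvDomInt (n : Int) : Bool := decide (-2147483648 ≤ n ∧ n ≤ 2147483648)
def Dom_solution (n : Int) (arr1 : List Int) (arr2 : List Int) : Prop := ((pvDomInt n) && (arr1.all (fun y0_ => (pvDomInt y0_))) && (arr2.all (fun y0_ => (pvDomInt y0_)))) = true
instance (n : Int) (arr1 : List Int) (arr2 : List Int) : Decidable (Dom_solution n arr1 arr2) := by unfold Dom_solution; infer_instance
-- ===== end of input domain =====

-- B renders each row by integer bitwise OR + zfill + a char translation table, replacing A's
-- three passes (binary strings with manual padding, decimal addition of those strings, and a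
-- char-indexing render loop).  Objective: simpler, same asymptotic cost.

-- ===== PORT A =====
-- Literal transliteration of A.  Python `arr[i]` inside the loops is in range whenever
-- Pre_solution holds, so it is ported as `PySem.List.pyGetD` (the default is never hit inside
-- Pre_); `int(s)` is `PySem.Int.ofChars?`, again with a `getD` that Pre_ makes unreachable
-- (int() cannot raise there); `str(i)` on a value that is already a string is the identity
-- and is ported as such; strings are kept as `List Char` (the PySem.Chars level) and wrapped
-- with `String.ofList` when appended to the result, exactly where Python appends `ss`.
def solution (n : Int) (arr1 : List Int) (arr2 : List Int) : List String :=
  -- first loop: build arr1_bin / arr2_bin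
  let p : List (List Char) × List (List Char) :=
    (PySem.List.pyRange 0 n 1).foldl (fun st i =>
      let b1 := PySem.Int.toBinChars (PySem.List.pyGetD arr1 i 0)
      let b2 := PySem.Int.toBinChars (PySem.List.pyGetD arr2 i 0)
      let a1 := if (b1.length : Int) < n then
          st.1 ++ [List.replicate (n - (b1.length : Int)).toNat '0' ++ b1]
        else st.1 ++ [b1]
      let a2 := if (b2.length : Int) < n then
          st.2 ++ [List.replicate (n - (b2.length : Int)).toNat '0' ++ b2]
        else st.2 ++ [b2]
      (a1, a2)) ([], [])
  -- second loop: decimal addition of the two binary strings, re-pad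
  let result_s : List (List Char) :=
    (PySem.List.pyRange 0 n 1).foldl (fun acc i =>
      let num := (PySem.Int.ofChars? (PySem.List.pyGetD p.1 i [])).getD 0 +
                 (PySem.Int.ofChars? (PySem.List.pyGetD p.2 i [])).getD 0
      let s := PySem.Int.toChars num
      let s := if (s.length : Int) < n then
          List.replicate (n - (s.length : Int)).toNat '0' ++ s
        else s
      acc ++ [s]) []
  -- third loop: render, char by char
  result_s.foldl (fun result s =>
    let ss := (PySem.List.pyRange 0 (s.length : Int) 1).foldl (fun ss j =>
      if PySem.List.pyGetD s j ' ' = '0' then ss ++ [' '] else ss ++ ['#']) []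
    result ++ [String.ofList ss]) []

-- ===== PORT B =====
-- hand port of str.translate with str.maketrans('01', ' #'): exact, the table maps the two
-- BMP chars '0','1' and every other char is left unchanged, which is List.map on the chars
def pyTranslate01 (cs : List Char) : List Char :=
  cs.map (fun c => if c = '0' then ' ' else if c = '1' then '#' else c)

def solution_alt (n : Int) (arr1 : List Int) (arr2 : List Int) : List String :=
  (PySem.List.pyRange 0 n 1).map (fun i =>
    String.ofList (pyTranslate01 (PySem.Chars.zfill
      (PySem.Int.toBinChars
        (PySem.Int.bor (PySem.List.pyGetD arr1 i 0) (PySem.List.pyGetD arr2 i 0))) n)))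

-- ===== PRECONDITION & SPEC =====
-- Pre_ excludes (a) rows the loops index past the end of either array (Python IndexError),
-- and (b) negative entries among the first n, on which A either hits int('0…0-…')
-- (ValueError) or, when no padding happens, accidentally renders the minus sign as '#'.
def Pre_solution (n : Int) (arr1 : List Int) (arr2 : List Int) : Prop :=
  n ≤ (arr1.length : Int) ∧ n ≤ (arr2.length : Int) ∧
  (∀ x ∈ arr1.take n.toNat, 0 ≤ x) ∧ (∀ x ∈ arr2.take n.toNat, 0 ≤ x)
instance (n : Int) (arr1 : List Int) (arr2 : List Int) : Decidable (Pre_solution n arr1 arr2) := by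
  unfold Pre_solution; infer_instance

def pvWitness_solution : Int × List Int × List Int := (2, [9, 20], [30, 1])

def Spec_solution (n : Int) (arr1 : List Int) (arr2 : List Int) (out : List String) : Prop :=
  out = solution_alt n arr1 arr2
instance (n : Int) (arr1 : List Int) (arr2 : List Int) (out : List String) :
    Decidable (Spec_solution n arr1 arr2 out) := by unfold Spec_solution; infer_instance

-- ===== CLAIM (what is proved, stated in full; the proofs are below) =====
def Claim_equal_solution : Prop := ∀ (n : Int) (arr1 : List Int) (arr2 : List Int),
  Dom_solution n arr1 arr2 → Pre_solution n arr1 arr2 →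
  Spec_solution n arr1 arr2 (solution n arr1 arr2)

-- ===== LEMMAS AND PROOFS =====

def dstep (a : Nat) (c : Char) : Nat := a * 10 + (c.toNat - '0'.toNat)
def b10 (m : Nat) : Nat := Nat.ofDigits 10 (Nat.digits 2 m)

theorem toDigitsCore_eq (b : Nat) (hb : 2 ≤ b) :
    ∀ (f n : Nat) (l : List Char), 0 < n → n < f →
      Nat.toDigitsCore b f n l = ((Nat.digits b n).map Nat.digitChar).reverse ++ l := by
  intro f
  induction f with
  | zero => intro n l h1 h2; omega
  | succ f ih =>
    intro n l h1 h2
    rw [Nat.toDigitsCore]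
    by_cases hx : n / b = 0
    · simp only [hx, if_true]
      rw [Nat.digits_def' (by omega) h1, hx, Nat.digits_zero]
      simp
    · simp only [hx, if_false]
      rw [ih (n / b) _ (Nat.pos_of_ne_zero hx) (by
        have : n / b < n := Nat.div_lt_self h1 (by omega)
        omega)]
      rw [Nat.digits_def' (by omega) h1]
      simp

theorem toDigits_eq (b n : Nat) (hb : 2 ≤ b) (hn : 0 < n) :
    Nat.toDigits b n = ((Nat.digits b n).map Nat.digitChar).reverse := by
  rw [Nat.toDigits, toDigitsCore_eq b hb (n+1) n [] hn (by omega), List.append_nil]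

theorem digitChar_bin (d : Nat) (h : d < 2) : Nat.digitChar d = '0' ∨ Nat.digitChar d = '1' := by
  interval_cases d <;> simp [Nat.digitChar]

theorem digitChar_val (d : Nat) (h : d < 10) : (Nat.digitChar d).toNat - '0'.toNat = d := by
  interval_cases d <;> decide

theorem binchars (m : Nat) : ∀ c ∈ Nat.toDigits 2 m, c = '0' ∨ c = '1' := by
  rcases Nat.eq_zero_or_pos m with rfl | hm
  · intro c hc
    have : Nat.toDigits 2 0 = ['0'] := rfl
    rw [this] at hc
    simp at hc
    simp [hc]
  · rw [toDigits_eq 2 m (by norm_num) hm]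
    intro c hc
    rw [List.mem_reverse, List.mem_map] at hc
    obtain ⟨d, hd, rfl⟩ := hc
    exact digitChar_bin d (Nat.digits_lt_base (by norm_num) hd)

theorem toDigits_ne_nil (b m : Nat) (hb : 2 ≤ b) : Nat.toDigits b m ≠ [] := by
  rcases Nat.eq_zero_or_pos m with rfl | hm
  · rw [Nat.toDigits, Nat.toDigitsCore]
    simp [Nat.zero_div]
  · rw [toDigits_eq b m hb hm]
    simp [Nat.digits_ne_nil_iff_ne_zero, Nat.pos_iff_ne_zero.mp hm]

theorem foldl_dstep_digits (l : List Nat) (hl : ∀ d ∈ l, d < 10) (A : Nat) :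
    List.foldl dstep A ((l.map Nat.digitChar).reverse) = A * 10 ^ l.length + Nat.ofDigits 10 l := by
  induction l generalizing A with
  | nil => simp [Nat.ofDigits_nil]
  | cons d ds ih =>
    rw [List.map_cons, List.reverse_cons, List.foldl_append, ih (fun x hx => hl x (by simp [hx]))]
    simp only [List.foldl_cons, List.foldl_nil, dstep, Nat.ofDigits_cons, List.length_cons]
    rw [digitChar_val d (hl d (by simp))]
    ring

theorem foldl_toDigits (m : Nat) : List.foldl dstep 0 (Nat.toDigits 2 m) = b10 m := by
  rcases Nat.eq_zero_or_pos m with rfl | hm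
  · simp [b10, Nat.toDigits, Nat.toDigitsCore, Nat.zero_div]
    decide
  · rw [toDigits_eq 2 m (by norm_num) hm,
      foldl_dstep_digits _ (fun d hd => lt_trans (Nat.digits_lt_base (by norm_num) hd) (by norm_num)) 0,
      b10]
    ring

theorem b10_pos (m : Nat) (hm : 0 < m) : 0 < b10 m := by
  have h1 : m ≤ b10 m := by
    calc m = Nat.ofDigits 2 (Nat.digits 2 m) := (Nat.ofDigits_digits 2 m).symm
    _ ≤ Nat.ofDigits 10 (Nat.digits 2 m) := Nat.ofDigits_monotone _ (by norm_num)
  omega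

theorem digits_getLast?_ne (b m : Nat) : (Nat.digits b m).getLast? ≠ some 0 := by
  rcases Nat.eq_zero_or_pos m with rfl | hm
  · simp
  · have hne : Nat.digits b m ≠ [] := by
      rcases Nat.lt_or_ge b 2 with hb | hb
      · interval_cases b
        · simp [Nat.digits_zero_succ' (n := m) (Nat.pos_iff_ne_zero.mp hm)]
        · simp [Nat.digits_one]
          omega
      · simpa [Nat.digits_ne_nil_iff_ne_zero] using Nat.pos_iff_ne_zero.mp hm
    rw [List.getLast?_eq_some_getLast hne]
    intro h
    exact Nat.getLast_digit_ne_zero b (Nat.pos_iff_ne_zero.mp hm) (by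
      injection h)
def zipAdd : List Nat → List Nat → List Nat
  | [], l2 => l2
  | l1, [] => l1
  | a :: as, b :: bs => (a + b) :: zipAdd as bs

@[simp] theorem zipAdd_nil_left (l : List Nat) : zipAdd [] l = l := by cases l <;> rfl
@[simp] theorem zipAdd_nil_right (l : List Nat) : zipAdd l [] = l := by cases l <;> rfl
theorem zipAdd_cons (a b : Nat) (as bs : List Nat) :
    zipAdd (a :: as) (b :: bs) = (a + b) :: zipAdd as bs := rfl

theorem ofDigits_zipAdd (l1 l2 : List Nat) :
    (Nat.ofDigits 10 (zipAdd l1 l2) : Nat) = Nat.ofDigits 10 l1 + Nat.ofDigits 10 l2 := by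
  induction l1 generalizing l2 with
  | nil => simp
  | cons a as ih =>
    cases l2 with
    | nil => simp
    | cons b bs =>
      rw [zipAdd_cons, Nat.ofDigits_cons, Nat.ofDigits_cons, Nat.ofDigits_cons, ih bs]
      ring

theorem zipAdd_mem (l1 l2 : List Nat) (h1 : ∀ d ∈ l1, d < 2) (h2 : ∀ d ∈ l2, d < 2) :
    ∀ d ∈ zipAdd l1 l2, d < 10 := by
  induction l1 generalizing l2 with
  | nil => intro d hd; rw [zipAdd_nil_left] at hd; exact lt_trans (h2 d hd) (by norm_num)
  | cons a as ih =>
    intro d hd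
    cases l2 with
    | nil =>
      rw [zipAdd_nil_right] at hd; exact lt_trans (h1 d hd) (by norm_num)
    | cons b bs =>
      rw [zipAdd_cons] at hd
      rcases List.mem_cons.mp hd with rfl | hd
      · have := h1 a (by simp); have := h2 b (by simp); omega
      · exact ih bs (fun x hx => h1 x (by simp [hx])) (fun x hx => h2 x (by simp [hx])) d hd

theorem zipAdd_getLast? (l1 l2 : List Nat) (h1 : l1.getLast? ≠ some 0) (h2 : l2.getLast? ≠ some 0) :
    (zipAdd l1 l2).getLast? ≠ some 0 := by
  induction l1 generalizing l2 with
  | nil => simpa using h2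
  | cons a as ih =>
    cases l2 with
    | nil => simpa using h1
    | cons b bs =>
      rw [zipAdd_cons]
      cases hz : zipAdd as bs with
      | nil =>
        have has : as = [] := by
          cases as with
          | nil => rfl
          | cons x xs => cases bs <;> simp [zipAdd] at hz
        have hbs : bs = [] := by
          cases bs with
          | nil => rfl
          | cons x xs => cases as <;> simp [zipAdd] at hz
        subst has hbs
        simp at h1 h2 ⊢
        omega
      | cons z zs =>
        rw [List.getLast?_cons_cons, ← hz]
        apply ih
        · cases as with
          | nil => cases bs with
            | nil => simp at hz
            | cons y ys => simpa using h2
          | cons x xs => rwa [List.getLast?_cons_cons] at h1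
        · cases bs with
          | nil => cases as with
            | nil => simp at hz
            | cons y ys => simpa using h1
          | cons x xs => rwa [List.getLast?_cons_cons] at h2

theorem lor_div_two (a b : Nat) : (a ||| b) / 2 = a / 2 ||| b / 2 := by
  apply Nat.eq_of_testBit_eq
  intro i
  simp [Nat.testBit_div_two]

theorem lor_mod_two_ne (a b : Nat) : ((a ||| b) % 2 ≠ 0) ↔ (a % 2 + b % 2 ≠ 0) := by
  have h := Nat.testBit_lor a b 0
  simp only [Nat.testBit_zero] at h
  have ha := Nat.mod_two_eq_zero_or_one a
  have hb := Nat.mod_two_eq_zero_or_one b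
  have hab := Nat.mod_two_eq_zero_or_one (a ||| b)
  rcases ha with ha | ha <;> rcases hb with hb | hb <;>
    simp [ha, hb] at h ⊢

theorem lor_eq_zero (a b : Nat) : a ||| b = 0 ↔ a = 0 ∧ b = 0 := by
  constructor
  · intro h
    constructor
    · apply Nat.eq_of_testBit_eq; intro i
      have := congrArg (fun x => Nat.testBit x i) h
      simp at this
      simp [this.1]
    · apply Nat.eq_of_testBit_eq; intro i
      have := congrArg (fun x => Nat.testBit x i) h
      simp at this
      simp [this.2]
  · rintro ⟨rfl, rfl⟩; rfl

theorem mapNe_zipAdd (a b : Nat) :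
    (zipAdd (Nat.digits 2 a) (Nat.digits 2 b)).map (fun d => decide (d ≠ 0)) =
      (Nat.digits 2 (a ||| b)).map (fun d => decide (d ≠ 0)) := by
  by_cases ha : a = 0
  · subst ha; simp
  by_cases hb : b = 0
  · subst hb; simp
  have hcalls : a / 2 + b / 2 < a + b := by omega
  have hor : a ||| b ≠ 0 := fun h => ha ((lor_eq_zero a b).mp h).1
  rw [Nat.digits_def' (b := 2) (by norm_num) (Nat.pos_of_ne_zero ha),
      Nat.digits_def' (b := 2) (by norm_num) (Nat.pos_of_ne_zero hb),
      Nat.digits_def' (b := 2) (by norm_num) (Nat.pos_of_ne_zero hor),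
      zipAdd_cons, List.map_cons, List.map_cons, lor_div_two]
  congr 1
  · have := lor_mod_two_ne a b
    by_cases h : (a ||| b) % 2 = 0 <;> simp [h] at this ⊢ <;> omega
  · exact mapNe_zipAdd (a / 2) (b / 2)
termination_by a + b
decreasing_by omega

theorem digits_sum_eq (a b : Nat) :
    Nat.digits 10 (b10 a + b10 b) = zipAdd (Nat.digits 2 a) (Nat.digits 2 b) := by
  have hv : b10 a + b10 b = Nat.ofDigits 10 (zipAdd (Nat.digits 2 a) (Nat.digits 2 b)) := by
    rw [ofDigits_zipAdd]; rfl
  rw [hv]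
  apply Nat.digits_ofDigits 10 (by norm_num)
  · exact zipAdd_mem _ _ (fun d hd => Nat.digits_lt_base (by norm_num) hd)
      (fun d hd => Nat.digits_lt_base (by norm_num) hd)
  · intro h
    have := zipAdd_getLast? (Nat.digits 2 a) (Nat.digits 2 b)
      (digits_getLast?_ne 2 a) (digits_getLast?_ne 2 b)
    rw [List.getLast?_eq_some_getLast h] at this
    intro hz
    exact this (by rw [hz])

def renderA (c : Char) : Char := if c = '0' then ' ' else '#'

theorem digitChar_render (d : Nat) (h : d < 10) :
    renderA (Nat.digitChar d) = (if decide (d ≠ 0) then '#' else ' ') := by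
  interval_cases d <;> decide

theorem digitChar_translate (d : Nat) (h : d < 2) :
    (if Nat.digitChar d = '0' then ' ' else if Nat.digitChar d = '1' then '#' else Nat.digitChar d)
      = (if decide (d ≠ 0) then '#' else ' ') := by
  interval_cases d <;> decide

theorem bodyEq (a b : Nat) :
    List.map renderA (Nat.toDigits 10 (b10 a + b10 b)) =
      pyTranslate01 (Nat.toDigits 2 (a ||| b)) := by
  by_cases hz : a = 0 ∧ b = 0
  · obtain ⟨rfl, rfl⟩ := hz; decide
  · have hsum : 0 < b10 a + b10 b := by
      rcases Nat.eq_zero_or_pos a with rfl | ha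
      · rcases Nat.eq_zero_or_pos b with rfl | hb
        · exact absurd ⟨rfl, rfl⟩ hz
        · have := b10_pos b hb; omega
      · have := b10_pos a ha; omega
    have hor : 0 < (a ||| b) := by
      rcases Nat.eq_zero_or_pos (a ||| b) with h | h
      -- h : a ||| b = 0
      · exact absurd ((lor_eq_zero a b).mp h) hz
      · exact h
    rw [toDigits_eq 10 _ (by norm_num) hsum, toDigits_eq 2 _ (by norm_num) hor,
        digits_sum_eq, pyTranslate01]
    rw [List.map_reverse, List.map_reverse, List.map_map, List.map_map]
    congr 1
    have h1 : (zipAdd (Nat.digits 2 a) (Nat.digits 2 b)).map (renderA ∘ Nat.digitChar) =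
        (zipAdd (Nat.digits 2 a) (Nat.digits 2 b)).map
          ((fun t => if t then '#' else ' ') ∘ (fun d => decide (d ≠ 0))) := by
      apply List.map_congr_left
      intro d hd
      have hlt : d < 10 := zipAdd_mem _ _ (fun x hx => Nat.digits_lt_base (by norm_num) hx)
        (fun x hx => Nat.digits_lt_base (by norm_num) hx) d hd
      simpa using digitChar_render d hlt
    have h2 : (Nat.digits 2 (a ||| b)).map
          ((fun c => if c = '0' then ' ' else if c = '1' then '#' else c) ∘ Nat.digitChar) =
        (Nat.digits 2 (a ||| b)).map
          ((fun t => if t then '#' else ' ') ∘ (fun d => decide (d ≠ 0))) := by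
      apply List.map_congr_left
      intro d hd
      simpa using digitChar_translate d (Nat.digits_lt_base (by norm_num) hd)
    rw [h1, h2, ← List.map_map, ← List.map_map, mapNe_zipAdd]

theorem lenEq (a b : Nat) :
    (Nat.toDigits 10 (b10 a + b10 b)).length = (Nat.toDigits 2 (a ||| b)).length := by
  by_cases hz : a = 0 ∧ b = 0
  · obtain ⟨rfl, rfl⟩ := hz; decide
  · have := congrArg List.length (bodyEq a b)
    simpa [pyTranslate01] using this

theorem translate_replicate (k : Nat) (cs : List Char) :
    pyTranslate01 (List.replicate k '0' ++ cs) = List.replicate k ' ' ++ pyTranslate01 cs := by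
  simp [pyTranslate01, List.map_replicate]

theorem render_replicate (k : Nat) (cs : List Char) :
    List.map renderA (List.replicate k '0' ++ cs) = List.replicate k ' ' ++ List.map renderA cs := by
  simp [renderA, List.map_replicate]

theorem zfill_eq (cs : List Char) (w : Int) (h : ∀ c ∈ cs, c = '0' ∨ c = '1') (hne : cs ≠ []) :
    PySem.Chars.zfill cs w = List.replicate (w.toNat - cs.length) '0' ++ cs := by
  simp only [PySem.Chars.zfill]
  by_cases hw : w ≤ (cs.length : Int)
  · simp only [hw, if_true]
    have : w.toNat - cs.length = 0 := by omega
    rw [this]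
    simp
  · simp only [hw, if_false]
    cases cs with
    | nil => exact absurd rfl hne
    | cons c rest =>
      have : ¬(c = '+' ∨ c = '-') := by
        rcases h c (by simp) with rfl | rfl <;> decide
      simp only [this, if_false]

theorem core_row (a b : Nat) (n : Int) :
    (List.map renderA
      (if ((Nat.toDigits 10 (b10 a + b10 b)).length : Int) < n then
        List.replicate (n - ((Nat.toDigits 10 (b10 a + b10 b)).length : Int)).toNat '0' ++
          Nat.toDigits 10 (b10 a + b10 b)
      else Nat.toDigits 10 (b10 a + b10 b))) =
    pyTranslate01 (PySem.Chars.zfill (Nat.toDigits 2 (a ||| b)) n) := by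
  rw [zfill_eq _ _ (binchars _) (toDigits_ne_nil 2 _ (by norm_num)), translate_replicate, ← bodyEq]
  by_cases hlt : ((Nat.toDigits 10 (b10 a + b10 b)).length : Int) < n
  · simp only [hlt, if_true]
    rw [render_replicate]
    congr 2
    rw [← lenEq]
    omega
  · simp only [hlt, if_false]
    have : n.toNat - (Nat.toDigits 2 (a ||| b)).length = 0 := by
      rw [← lenEq]; omega
    rw [this]
    simp

theorem toBinChars_nonneg (x : Int) (hx : 0 ≤ x) :
    PySem.Int.toBinChars x = Nat.toDigits 2 x.toNat := by
  simp [PySem.Int.toBinChars, not_lt.mpr hx]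

theorem toChars_natCast (k : Nat) : PySem.Int.toChars (k : Int) = Nat.toDigits 10 k := by
  simp [PySem.Int.toChars]

theorem parse_bin (ds : List Char) (hne : ds ≠ [])
    (hdig : ∀ c ∈ ds, c = '0' ∨ c = '1') :
    PySem.Int.ofChars? ds = some ((ds.foldl dstep 0 : Nat) : Int) := by
  have hnospace : ∀ c ∈ ds, PySem.Int.isIntSpace c = false := by
    intro c hc; rcases hdig c hc with rfl | rfl <;> decide
  have h1 : List.dropWhile PySem.Int.isIntSpace ds = ds :=
    List.dropWhile_eq_self_iff.mpr (by
      cases ds with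
      | nil => simp
      | cons c rest => simp [hnospace c (by simp)])
  have h2 : List.dropWhile PySem.Int.isIntSpace ds.reverse = ds.reverse :=
    List.dropWhile_eq_self_iff.mpr (by
      cases hr : ds.reverse with
      | nil => simp
      | cons c rest =>
        have : c ∈ ds := by
          have : c ∈ ds.reverse := by rw [hr]; simp
          simpa using this
        simp [hnospace c this])
  simp only [PySem.Int.ofChars?, h1, h2, List.reverse_reverse]
  obtain ⟨c, rest, rfl⟩ : ∃ c rest, ds = c :: rest := by
    cases ds with
    | nil => exact absurd rfl hne
    | cons c rest => exact ⟨c, rest, rfl⟩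
  rcases hdig c (by simp) with rfl | rfl
  · show Option.map _ (Bind.bind ((_ : List Char → Bool → Nat → Option Nat) rest true ((0:Nat) * 10 + ('0'.toNat - '0'.toNat))) _) = _
    rw [List.foldl_cons]
    simp only [dstep]
    have hdr : ∀ c ∈ rest, c = '0' ∨ c = '1' := fun c hc => hdig c (by simp [hc])
    generalize (0:Nat) * 10 + ('0'.toNat - '0'.toNat) = acc
    clear hdig hnospace h1 h2 hne
    induction rest generalizing acc with
    | nil => rfl
    | cons d rest' ih =>
      rcases hdr d (by simp) with rfl | rfl
      · rw [List.foldl_cons]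
        simp only [dstep]
        exact ih (fun c hc => hdr c (by simp [hc])) _
      · rw [List.foldl_cons]
        simp only [dstep]
        exact ih (fun c hc => hdr c (by simp [hc])) _
  · show Option.map _ (Bind.bind ((_ : List Char → Bool → Nat → Option Nat) rest true ((0:Nat) * 10 + ('1'.toNat - '0'.toNat))) _) = _
    rw [List.foldl_cons]
    simp only [dstep]
    have hdr : ∀ c ∈ rest, c = '0' ∨ c = '1' := fun c hc => hdig c (by simp [hc])
    generalize (0:Nat) * 10 + ('1'.toNat - '0'.toNat) = acc
    clear hdig hnospace h1 h2 hne
    induction rest generalizing acc with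
    | nil => rfl
    | cons d rest' ih =>
      rcases hdr d (by simp) with rfl | rfl
      · rw [List.foldl_cons]
        simp only [dstep]
        exact ih (fun c hc => hdr c (by simp [hc])) _
      · rw [List.foldl_cons]
        simp only [dstep]
        exact ih (fun c hc => hdr c (by simp [hc])) _

theorem foldl_dstep_replicate (k : Nat) :
    ∀ cs : List Char, List.foldl dstep 0 (List.replicate k '0' ++ cs) = List.foldl dstep 0 cs := by
  induction k with
  | zero => intro cs; rfl
  | succ k ih => intro cs; rw [List.replicate_succ, List.cons_append, List.foldl_cons]; exact ih cs

theorem parse_padded (m : Nat) (n : Int) :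
    PySem.Int.ofChars?
      (if ((Nat.toDigits 2 m).length : Int) < n then
        List.replicate (n - ((Nat.toDigits 2 m).length : Int)).toNat '0' ++ Nat.toDigits 2 m
      else Nat.toDigits 2 m) = some ((b10 m : Nat) : Int) := by
  by_cases h : ((Nat.toDigits 2 m).length : Int) < n
  · simp only [h, if_true]
    rw [parse_bin _ (by simp [toDigits_ne_nil 2 m (by norm_num)]) (by
      intro c hc
      rcases List.mem_append.mp hc with hc | hc
      · left; exact List.eq_of_mem_replicate hc
      · exact binchars m c hc)]
    rw [foldl_dstep_replicate, foldl_toDigits]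
  · simp only [h, if_false]
    rw [parse_bin _ (toDigits_ne_nil 2 m (by norm_num)) (binchars m), foldl_toDigits]

def padTo (nn : Int) (cs : List Char) : List Char :=
  if (cs.length : Int) < nn then List.replicate (nn - (cs.length : Int)).toNat '0' ++ cs else cs

def rowS (nn x y : Int) : List Char :=
  padTo nn (PySem.Int.toChars
    ((PySem.Int.ofChars? (padTo nn (PySem.Int.toBinChars x))).getD 0 +
     (PySem.Int.ofChars? (padTo nn (PySem.Int.toBinChars y))).getD 0))

theorem row_eq (n x y : Int) (hx : 0 ≤ x) (hy : 0 ≤ y) :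
    List.map renderA (rowS n x y) =
      pyTranslate01 (PySem.Chars.zfill (PySem.Int.toBinChars (PySem.Int.bor x y)) n) := by
  rw [rowS, padTo, padTo, padTo, toBinChars_nonneg x hx, toBinChars_nonneg y hy,
      parse_padded, parse_padded]
  simp only [Option.getD_some]
  have hsum : ((b10 x.toNat : Nat) : Int) + ((b10 y.toNat : Nat) : Int) =
      ((b10 x.toNat + b10 y.toNat : Nat) : Int) := by push_cast; ring
  rw [hsum, toChars_natCast]
  have hbor : PySem.Int.bor x y = ((x.toNat ||| y.toNat : Nat) : Int) :=
    PySem.Int.bor_of_nonneg hx hy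
  rw [hbor, toBinChars_nonneg _ (by positivity), Int.toNat_natCast]
  exact core_row x.toNat y.toNat n


theorem pyRange_nonpos (n : Int) (h : n ≤ 0) : PySem.List.pyRange 0 n 1 = [] := by
  simp [PySem.List.pyRange]; omega

theorem loop1_char (n : Int) (arr1 arr2 : List Int) (l : List Int)
    (xs ys : List (List Char)) :
    l.foldl (fun st i =>
      let b1 := PySem.Int.toBinChars (PySem.List.pyGetD arr1 i 0)
      let b2 := PySem.Int.toBinChars (PySem.List.pyGetD arr2 i 0)
      let a1 := if ((b1.length : Int)) < n then
          st.1 ++ [List.replicate (n - (b1.length : Int)).toNat '0' ++ b1]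
        else st.1 ++ [b1]
      let a2 := if ((b2.length : Int)) < n then
          st.2 ++ [List.replicate (n - (b2.length : Int)).toNat '0' ++ b2]
        else st.2 ++ [b2]
      (a1, a2)) (xs, ys)
    = (xs ++ l.map (fun i => padTo n (PySem.Int.toBinChars (PySem.List.pyGetD arr1 i 0))),
       ys ++ l.map (fun i => padTo n (PySem.Int.toBinChars (PySem.List.pyGetD arr2 i 0)))) := by
  induction l generalizing xs ys with
  | nil => simp
  | cons i l ih =>
    rw [List.foldl_cons]
    show l.foldl _ (_, _) = _
    rw [ih]
    rw [← apply_ite (fun z => xs ++ [z]), ← apply_ite (fun z => ys ++ [z])]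
    simp [padTo]

theorem inner_render (s : List Char) :
    (PySem.List.pyRange 0 ((s.length : Int)) 1).foldl (fun ss j =>
      if PySem.List.pyGetD s j ' ' = '0' then ss ++ [' '] else ss ++ ['#']) []
    = List.map renderA s := by
  have hb : (fun (ss : List Char) (j : Int) =>
      if PySem.List.pyGetD s j ' ' = '0' then ss ++ [' '] else ss ++ ['#'])
      = (fun ss j => ss ++ [renderA (PySem.List.pyGetD s j ' ')]) := by
    funext ss j
    rw [renderA]
    exact (apply_ite (fun c => ss ++ [c]) _ _ _).symm
  rw [hb, PySem.List.foldl_append_singleton_eq_map]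
  have : List.map (fun j => renderA (PySem.List.pyGetD s j ' ')) (PySem.List.pyRange 0 ((s.length : Int)) 1)
      = List.map renderA (List.map (fun j => PySem.List.pyGetD s j ' ') (PySem.List.pyRange 0 ((s.length : Int)) 1)) := by
    rw [List.map_map]; rfl
  rw [List.nil_append, this, show PySem.List.pyRange 0 ((s.length : Int)) 1 = PySem.List.pyRange 0 (PySem.List.len s) from rfl,
    PySem.List.map_pyGetD_pyRange_zero s ' ']

theorem getD_nonneg (l : List Int) (k m : Nat) (hk : k < m) (hm : m ≤ l.length)
    (hp : ∀ x ∈ List.take m l, 0 ≤ x) : 0 ≤ l.getD k 0 := by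
  rw [List.getD_eq_getElem l 0 (by omega)]
  apply hp
  rw [← List.getElem_take (j := m) (h := by rw [List.length_take]; omega)]
  exact List.getElem_mem _

-- ===== VERDICT (by name: the statement is the Claim_ definition above) =====
theorem solution_spec : Claim_equal_solution := by
  intro n arr1 arr2 hdom hpre
  obtain ⟨hl1, hl2, hp1, hp2⟩ := hpre
  unfold Spec_solution solution solution_alt
  rcases (by omega : n ≤ 0 ∨ 0 < n) with hn | hn
  · rw [pyRange_nonpos n hn]
    rfl
  · rw [loop1_char]
    rw [PySem.List.foldl_append_singleton_eq_map]
    rw [PySem.List.foldl_append_singleton_eq_map]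
    simp only [List.nil_append, List.map_map]
    apply List.map_congr_left
    intro i hi
    obtain ⟨hi0, hin⟩ := PySem.List.mem_pyRange_one.mp hi
    have hik : i = ((i.toNat : Nat) : Int) := by omega
    have hkn : i.toNat < n.toNat := by omega
    have e1 : PySem.List.pyGetD
        (List.map (fun i => padTo n (PySem.Int.toBinChars (PySem.List.pyGetD arr1 i 0))) (PySem.List.pyRange 0 n)) i []
        = padTo n (PySem.Int.toBinChars (PySem.List.pyGetD arr1 i 0)) := by
      rw [hik, show n = ((n.toNat : Nat) : Int) by omega]
      rw [PySem.List.pyGetD_map_pyRange _ n.toNat i.toNat [] hkn]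
    have e2 : PySem.List.pyGetD
        (List.map (fun i => padTo n (PySem.Int.toBinChars (PySem.List.pyGetD arr2 i 0))) (PySem.List.pyRange 0 n)) i []
        = padTo n (PySem.Int.toBinChars (PySem.List.pyGetD arr2 i 0)) := by
      rw [hik, show n = ((n.toNat : Nat) : Int) by omega]
      rw [PySem.List.pyGetD_map_pyRange _ n.toNat i.toNat [] hkn]
    simp only [Function.comp]
    simp only [e1, e2]
    rw [inner_render]
    have hx : 0 ≤ PySem.List.pyGetD arr1 i 0 := by
      rw [hik, PySem.List.pyGetD_natCast]
      exact getD_nonneg arr1 i.toNat n.toNat hkn (by omega) hp1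
    have hy : 0 ≤ PySem.List.pyGetD arr2 i 0 := by
      rw [hik, PySem.List.pyGetD_natCast]
      exact getD_nonneg arr2 i.toNat n.toNat hkn (by omega) hp2
    refine congrArg String.ofList ?_
    show List.map renderA (rowS n (PySem.List.pyGetD arr1 i 0) (PySem.List.pyGetD arr2 i 0)) = _
    exact row_eq n _ _ hx hy
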